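-- pv_equiv track=rewrite | github.com/Mawuawoe/ALX-Portfolio-Project | Salinity_web_app/webflask/app.py | generate_filter_pan_ids
-- ===== SOURCE A (Python) =====
-- def generate_filter_pan_ids(selected_filter):
--     """
--     Generate a list of pan IDs based on the selected filter.
--     """
--     # Initialize an empty list
--     pan_ids = []
--
--     # Depending on the filter, generate the appropriate pan_ids list
--     if selected_filter == 'pan' or selected_filter == '':
--         pan_ids.extend(f'Pan{i}' for i in range(1, 33))  # 1 to 32
--     if selected_filter == 'reservoir' or selected_filter == '':
--         pan_ids.extend(f'R{i}' for i in range(1, 6))  # 1 to 5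
--     if selected_filter == 'pcr' or selected_filter == '':
--         pan_ids.extend(['PCRA', 'PCRB'])
--
--     return pan_ids
-- ===== SOURCE B (Python) =====
-- def generate_filter_pan_ids(selected_filter):
--     """
--     Generate a list of pan IDs based on the selected filter.
--     """
--     # One flat catalogue of (category, id) pairs, filtered in a single pass:
--     # no branching on the filter value at all.
--     catalogue = (
--         [('pan', f'Pan{i}') for i in range(1, 33)]
--         + [('reservoir', f'R{i}') for i in range(1, 6)]
--         + [('pcr', pid) for pid in ('PCRA', 'PCRB')]
--     )
--     return [pid for cat, pid in catalogue if selected_filter in ('', cat)]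
-- ===== Notes on version B (the rewrite author's own statement) =====
-- stated objective: alternative
-- what changed: Replaces three sequential conditional-extend passes over a mutable accumulator with one flat catalogue of (category, id) pairs filtered in a single comprehension pass with a membership test, removing all branching on the filter value.
import Mathlib
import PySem

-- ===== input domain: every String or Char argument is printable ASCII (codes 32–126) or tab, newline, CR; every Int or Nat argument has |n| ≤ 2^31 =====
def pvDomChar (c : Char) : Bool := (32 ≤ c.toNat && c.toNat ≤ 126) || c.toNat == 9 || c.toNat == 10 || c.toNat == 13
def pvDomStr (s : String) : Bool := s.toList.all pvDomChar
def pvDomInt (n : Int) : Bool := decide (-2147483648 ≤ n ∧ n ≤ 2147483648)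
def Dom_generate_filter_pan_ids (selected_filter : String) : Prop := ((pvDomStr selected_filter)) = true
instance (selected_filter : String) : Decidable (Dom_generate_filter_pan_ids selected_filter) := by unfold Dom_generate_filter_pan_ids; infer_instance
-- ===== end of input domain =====

-- B replaces A's three conditional-extend passes by one flat tagged catalogue filtered in a single pass (alternative decomposition).

-- ===== PORT A =====
def generate_filter_pan_ids (selected_filter : String) : List String :=
  let pan_ids : List String := []
  let pan_ids :=
    if selected_filter = "pan" ∨ selected_filter = "" then
      pan_ids ++ (PySem.List.pyRange 1 33 1).map (fun i => "Pan" ++ PySem.Int.toStr i)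
    else pan_ids
  let pan_ids :=
    if selected_filter = "reservoir" ∨ selected_filter = "" then
      pan_ids ++ (PySem.List.pyRange 1 6 1).map (fun i => "R" ++ PySem.Int.toStr i)
    else pan_ids
  let pan_ids :=
    if selected_filter = "pcr" ∨ selected_filter = "" then
      pan_ids ++ ["PCRA", "PCRB"]
    else pan_ids
  pan_ids

-- ===== PORT B =====
def generate_filter_pan_ids_alt (selected_filter : String) : List String :=
  let catalogue : List (String × String) :=
    (PySem.List.pyRange 1 33 1).map (fun i => ("pan", "Pan" ++ PySem.Int.toStr i))
      ++ (PySem.List.pyRange 1 6 1).map (fun i => ("reservoir", "R" ++ PySem.Int.toStr i))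
      ++ ["PCRA", "PCRB"].map (fun pid => ("pcr", pid))
  (catalogue.filter (fun p => selected_filter = "" ∨ selected_filter = p.1)).map (fun p => p.2)

-- ===== PRECONDITION & SPEC =====
def Spec_generate_filter_pan_ids (selected_filter : String) (out : List String) : Prop := out = generate_filter_pan_ids_alt selected_filter
instance (selected_filter : String) (out : List String) : Decidable (Spec_generate_filter_pan_ids selected_filter out) := by unfold Spec_generate_filter_pan_ids; infer_instance

-- ===== CLAIM (what is proved, stated in full; the proofs are below) =====
def Claim_equal_generate_filter_pan_ids : Prop := ∀ (selected_filter : String), Dom_generate_filter_pan_ids selected_filter → Spec_generate_filter_pan_ids selected_filter (generate_filter_pan_ids selected_filter)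

-- ===== LEMMAS AND PROOFS =====

-- ===== VERDICT (by name: the statement is the Claim_ definition above) =====
theorem generate_filter_pan_ids_spec : Claim_equal_generate_filter_pan_ids := by
  intro s _
  unfold Spec_generate_filter_pan_ids generate_filter_pan_ids generate_filter_pan_ids_alt
  by_cases h0 : s = ""
  · subst h0; decide
  · by_cases h1 : s = "pan"
    · subst h1; decide
    · by_cases h2 : s = "reservoir"
      · subst h2; decide
      · by_cases h3 : s = "pcr"
        · subst h3; decide
        · simp [h0, h1, h2, h3, List.filter_eq_nil_iff, PySem.List.pyRange]
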